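-- pv_equiv track=rewrite | github.com/olim88/diamondfirecodecreator | old stuff/Compiler.py | ifCharOutOfBracket
-- ===== SOURCE A (Python) =====
-- def ifCharOutOfBracket(arg,charCheck):
--     bracketDepth = 0
--     for char in arg:
--         if char == "(":
--             bracketDepth += 1
--         if char == ")":
--             bracketDepth -= 1
--         if bracketDepth == 0 and char == charCheck:
--             return True
--     return False
-- ===== SOURCE B (Python) =====
-- def ifCharOutOfBracket(arg, charCheck):
--     # char is outside brackets iff, in the prefix ending at it, '(' and ')' counts balance
--     return any(
--         c == charCheck
--         and arg[: i + 1].count("(") == arg[: i + 1].count(")")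
--         for i, c in enumerate(arg)
--     )
-- ===== Notes on version B (the rewrite author's own statement) =====
-- stated objective: alternative
-- what changed: B keeps no running depth counter: for each position it tests balance directly by comparing the counts of '(' and ')' in the prefix arg[:i+1] (via slicing and str.count), replacing A's stateful single-pass counter with stateless per-position prefix counting.
import Mathlib
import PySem

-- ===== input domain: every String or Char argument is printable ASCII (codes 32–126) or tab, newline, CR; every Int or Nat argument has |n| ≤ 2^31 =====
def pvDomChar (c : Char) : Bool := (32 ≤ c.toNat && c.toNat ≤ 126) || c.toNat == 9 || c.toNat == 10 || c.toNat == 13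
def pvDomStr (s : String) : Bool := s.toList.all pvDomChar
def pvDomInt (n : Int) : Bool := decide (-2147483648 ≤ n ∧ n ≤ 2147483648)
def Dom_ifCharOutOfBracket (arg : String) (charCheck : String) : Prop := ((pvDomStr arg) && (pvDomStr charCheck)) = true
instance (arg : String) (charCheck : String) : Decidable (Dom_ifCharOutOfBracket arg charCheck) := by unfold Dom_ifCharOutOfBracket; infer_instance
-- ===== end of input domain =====

-- ===== PORT A =====
-- B replaces A's running depth counter by stateless per-position prefix counting (alternative decomposition).
-- A's loop: depth counter updated per char, early return on match at depth 0.
def pvGoA (cc : String) : List Char → Int → Bool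
  | [], _ => false
  | c :: rest, depth =>
    let d1 : Int := if c = '(' then depth + 1 else depth
    let d2 : Int := if c = ')' then d1 - 1 else d1
    if d2 = 0 ∧ String.ofList [c] = cc then true else pvGoA cc rest d2

def ifCharOutOfBracket (arg : String) (charCheck : String) : Bool :=
  pvGoA charCheck arg.toList 0

-- ===== PORT B =====
-- any(c == charCheck and arg[:i+1].count("(") == arg[:i+1].count(")") for i, c in enumerate(arg))
def ifCharOutOfBracket_alt (arg : String) (charCheck : String) : Bool :=
  (PySem.List.enumerate arg.toList 0).any fun p =>
    String.ofList [p.2] == charCheck &&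
    (PySem.List.slice arg.toList none (some (p.1 + 1))).count '(' ==
    (PySem.List.slice arg.toList none (some (p.1 + 1))).count ')'

-- ===== PRECONDITION & SPEC =====
def Spec_ifCharOutOfBracket (arg : String) (charCheck : String) (out : Bool) : Prop := out = ifCharOutOfBracket_alt arg charCheck
instance (arg : String) (charCheck : String) (out : Bool) : Decidable (Spec_ifCharOutOfBracket arg charCheck out) := by unfold Spec_ifCharOutOfBracket; infer_instance

-- ===== CLAIM (what is proved, stated in full; the proofs are below) =====
def Claim_equal_ifCharOutOfBracket : Prop := ∀ (arg : String) (charCheck : String), Dom_ifCharOutOfBracket arg charCheck → Spec_ifCharOutOfBracket arg charCheck (ifCharOutOfBracket arg charCheck)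

-- ===== LEMMAS AND PROOFS =====

-- signed bracket balance of a prefix
def pvBal (l : List Char) : Int := (l.count '(' : Int) - (l.count ')' : Int)

theorem pvBal_append_singleton (pre : List Char) (c : Char) :
    pvBal (pre ++ [c]) =
      (if c = ')' then (if c = '(' then pvBal pre + 1 else pvBal pre) - 1
       else (if c = '(' then pvBal pre + 1 else pvBal pre)) := by
  simp only [pvBal, List.count_append, List.count_singleton]
  split_ifs <;> simp_all <;> omega

-- loop invariant: A's loop over the suffix l, started at depth pvBal pre, equals
-- B's scan of the enumerated suffix testing prefix-count balance in pre ++ l.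
theorem pvGoA_eq (cc : String) (l pre : List Char) :
    pvGoA cc l (pvBal pre) =
      (PySem.List.enumerate l (pre.length : Int)).any (fun p =>
        String.ofList [p.2] == cc &&
        (PySem.List.slice (pre ++ l) none (some (p.1 + 1))).count '(' ==
        (PySem.List.slice (pre ++ l) none (some (p.1 + 1))).count ')') := by
  induction l generalizing pre with
  | nil => simp [pvGoA, PySem.List.enumerate]
  | cons c rest ih =>
    rw [PySem.List.enumerate_cons, List.any_cons]
    have hpre : pre ++ c :: rest = (pre ++ [c]) ++ rest := by simp
    have hslice : PySem.List.slice (pre ++ c :: rest) none (some ((pre.length : Int) + 1))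
        = pre ++ [c] := by
      have : (pre.length : Int) + 1 = ((pre.length + 1 : Nat) : Int) := by push_cast; ring
      rw [this, PySem.List.slice_to_natCast, hpre, List.take_append_of_le_length (by simp),
        List.take_of_length_le (by simp)]
    have htail : pvGoA cc rest (pvBal (pre ++ [c])) = (PySem.List.enumerate rest ((pre.length : Int) + 1)).any (fun p =>
        String.ofList [p.2] == cc &&
        (PySem.List.slice (pre ++ c :: rest) none (some (p.1 + 1))).count '(' ==
        (PySem.List.slice (pre ++ c :: rest) none (some (p.1 + 1))).count ')') := by
      rw [hpre]
      have := ih (pre ++ [c])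
      simpa [List.length_append, Int.natCast_add] using this
    simp only [pvGoA, ← pvBal_append_singleton pre c, htail, hslice]
    by_cases h : pvBal (pre ++ [c]) = 0 ∧ String.ofList [c] = cc
    · have hcnt : (pre ++ [c]).count '(' = (pre ++ [c]).count ')' := by
        have := h.1; unfold pvBal at this; omega
      simp [h.1, h.2, hcnt]
    · rw [if_neg h]
      have hb : (String.ofList [c] == cc &&
          ((pre ++ [c]).count '(' == (pre ++ [c]).count ')')) = false := by
        rcases Decidable.em (String.ofList [c] = cc) with hc | hc
        · have hcnt : ((pre ++ [c]).count '(' == (pre ++ [c]).count ')') = false := by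
            simp only [beq_eq_false_iff_ne, ne_eq]
            intro hcount
            exact h ⟨by unfold pvBal; omega, hc⟩
          rw [show (String.ofList [c] == cc) = true from by simp [hc], Bool.true_and, hcnt]
        · simp [hc]
      rw [hb, Bool.false_or]

-- ===== VERDICT (by name: the statement is the Claim_ definition above) =====
theorem ifCharOutOfBracket_spec : Claim_equal_ifCharOutOfBracket := by
  intro arg cc _
  unfold Spec_ifCharOutOfBracket ifCharOutOfBracket ifCharOutOfBracket_alt
  have := pvGoA_eq cc arg.toList []
  simpa [pvBal] using this
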